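-- pv_equiv track=rewrite | github.com/Saarthi-ai/Sales-And-onboarding-NLU | saarthi_train/postprocessing/inverse_text_normalization/run_predict.py | format_numbers_with_commas
-- ===== SOURCE A (Python) =====
-- def format_numbers_with_commas(sent, lang):
--     words = []
--     for word in sent.split(' '):
--         word_contains_digit = any(map(str.isdigit, word))
--         currency_sign = ''
--         if word_contains_digit:
--             if len(word) > 4 and ':' not in word:
--                 pos_of_first_digit_in_word = list(map(str.isdigit, word)).index(True)
--
--                 if pos_of_first_digit_in_word != 0:  # word can be like $90,00,936.59
--                     currency_sign = word[:pos_of_first_digit_in_word]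
--                     word = word[pos_of_first_digit_in_word:]
--
--                 s, *d = str(word).partition(".")
--                 # getting [num_before_decimal_point, decimal_point, num_after_decimal_point]
--                 if lang == 'hi':
--                     # adding commas after every 2 digits after the last 3 digits
--                     r = ",".join([s[x - 2:x] for x in range(-3, -len(s), -2)][::-1] + [s[-3:]])
--                 else:
--                     r = ",".join([s[x - 3:x] for x in range(-3, -len(s), -3)][::-1] + [s[-3:]])
--
--                 word = "".join([r] + d)  # joining decimal points as is
--
--                 if currency_sign:
--                     word = currency_sign + word
--                 words.append(word)
--             else:
--                 words.append(word)
--         else: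
--             words.append(word)
--     return ' '.join(words)
-- ===== SOURCE B (Python) =====
-- def _fmt_word(word, step):
--     if not any(c.isdigit() for c in word):
--         return word
--     if len(word) <= 4 or ':' in word:
--         return word
--     i = 0
--     while not word[i].isdigit():
--         i += 1
--     sign, word = word[:i], word[i:]
--     intpart, sep, frac = word.partition('.')
--     out = []
--     cnt = 0
--     for ch in reversed(intpart):
--         if cnt >= 3 and (cnt - 3) % step == 0:
--             out.append(',')
--         out.append(ch)
--         cnt += 1
--     grouped = ''.join(reversed(out))
--     return sign + grouped + sep + frac
--
--
-- def format_numbers_with_commas(sent, lang):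
--     step = 2 if lang == 'hi' else 3
--     return ' '.join(_fmt_word(w, step) for w in sent.split(' '))
-- ===== Notes on version B (the rewrite author's own statement) =====
-- stated objective: alternative
-- what changed: A builds each grouped number by comma-joining a list of negative-index slices taken over a reversed step range; B makes a single accumulator pass over the reversed integer part, inserting a comma after the first 3 characters and then after every 2 (hi) / 3 (other) characters, and reverses back.
import Mathlib
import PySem

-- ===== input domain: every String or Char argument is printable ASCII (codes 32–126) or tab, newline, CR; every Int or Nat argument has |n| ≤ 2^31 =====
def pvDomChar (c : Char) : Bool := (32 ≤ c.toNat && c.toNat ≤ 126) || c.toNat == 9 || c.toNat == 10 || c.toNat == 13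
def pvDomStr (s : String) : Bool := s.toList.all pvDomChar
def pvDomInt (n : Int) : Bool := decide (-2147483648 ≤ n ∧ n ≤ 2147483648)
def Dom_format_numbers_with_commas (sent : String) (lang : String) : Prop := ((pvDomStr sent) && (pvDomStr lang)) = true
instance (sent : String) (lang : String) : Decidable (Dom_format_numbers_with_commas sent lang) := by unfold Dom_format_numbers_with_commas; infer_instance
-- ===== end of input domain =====

-- B regroups digits with a single accumulator pass over the reversed integer part instead of A's
-- comma-join of negative-index slices over a step range; same return value (objective: alternative).


-- ===== PORT A =====
-- per-word body of A's loop (each branch of A appends exactly one word, so the loop is a map)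
def pvWordA (w0 : List Char) (lang : String) : List Char :=
  let wcd := (w0.map PySem.Chars.isdigit).any id
  if wcd then
    if 4 < w0.length ∧ PySem.Chars.isIn [':'] w0 = false then
      match PySem.List.index? (w0.map PySem.Chars.isdigit) true with
      | none => w0   -- unreachable: wcd guarantees a digit
      | some pos =>
        let cur := if pos ≠ 0 then PySem.List.slice w0 none (some (pos:Int)) else []
        let w1 := if pos ≠ 0 then PySem.List.slice w0 (some (pos:Int)) none else w0
        -- word.partition("."): exact hand port — split at the first '.' (find = first index, -1 if absent)
        let i := PySem.Chars.find w1 ['.']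
        let s := if i = -1 then w1 else PySem.List.slice w1 none (some i)
        let d : List (List Char) := if i = -1 then [[],[]] else [['.'], PySem.List.slice w1 (some (i+1)) none]
        let r := if lang = "hi" then
            PySem.Chars.join [','] ((((PySem.List.pyRange (-3) (-(s.length:Int)) (-2)).map (fun x => PySem.List.slice s (some (x-2)) (some x))).reverse) ++ [PySem.List.slice s (some (-3)) none])
          else
            PySem.Chars.join [','] ((((PySem.List.pyRange (-3) (-(s.length:Int)) (-3)).map (fun x => PySem.List.slice s (some (x-3)) (some x))).reverse) ++ [PySem.List.slice s (some (-3)) none])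
        let w2 := PySem.Chars.join [] ([r] ++ d)
        if cur ≠ [] then cur ++ w2 else w2
    else w0
  else w0

def format_numbers_with_commas (sent : String) (lang : String) : String :=
  String.ofList (PySem.Chars.join [' '] ((PySem.Chars.splitOn sent.toList [' ']).map (fun w => pvWordA w lang)))

-- ===== PORT B =====
-- index of the first digit (Source B's while loop)
def pvFirstDigit : List Char → Nat
  | [] => 0
  | c :: cs => if PySem.Chars.isdigit c then 0 else pvFirstDigit cs + 1

-- Source B's accumulator loop over the reversed integer part
def pvGroupLoop (step : Nat) : List Char → Nat → List Char → List Char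
  | [], _, acc => acc
  | c :: cs, cnt, acc =>
      pvGroupLoop step cs (cnt+1) (acc ++ (if 3 ≤ cnt ∧ (cnt - 3) % step = 0 then [',', c] else [c]))

def pvWordB (w : List Char) (step : Nat) : List Char :=
  if ¬ (w.any PySem.Chars.isdigit) then w
  else if w.length ≤ 4 ∨ PySem.Chars.isIn [':'] w = true then w
  else
    let i := pvFirstDigit w
    let sign := PySem.List.slice w none (some (i:Int))
    let rest := PySem.List.slice w (some (i:Int)) none
    -- word.partition('.'): exact hand port, split at the first '.'
    let j := PySem.Chars.find rest ['.']
    let intp := if j = -1 then rest else PySem.List.slice rest none (some j)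
    let sep : List Char := if j = -1 then [] else ['.']
    let frac := if j = -1 then [] else PySem.List.slice rest (some (j+1)) none
    let grouped := (pvGroupLoop step intp.reverse 0 []).reverse
    sign ++ grouped ++ sep ++ frac

def format_numbers_with_commas_alt (sent : String) (lang : String) : String :=
  let step := if lang = "hi" then 2 else 3
  String.ofList (PySem.Chars.join [' '] ((PySem.Chars.splitOn sent.toList [' ']).map (fun w => pvWordB w step)))

-- ===== PRECONDITION & SPEC =====
def Spec_format_numbers_with_commas (sent : String) (lang : String) (out : String) : Prop := out = format_numbers_with_commas_alt sent lang
instance (sent : String) (lang : String) (out : String) : Decidable (Spec_format_numbers_with_commas sent lang out) := by unfold Spec_format_numbers_with_commas; infer_instance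

-- ===== CLAIM (what is proved, stated in full; the proofs are below) =====
def Claim_equal_format_numbers_with_commas : Prop := ∀ (sent : String) (lang : String), Dom_format_numbers_with_commas sent lang → Spec_format_numbers_with_commas sent lang (format_numbers_with_commas sent lang)

-- ===== LEMMAS AND PROOFS =====

-- the grouped-by-k-from-the-right chunk list (proof-side common form; the 'k = 0' guard only serves termination)
def pvChunks (k : Nat) (T : List Char) : List (List Char) :=
  if T.length ≤ k ∨ k = 0 then [T] else T.take k :: pvChunks k (T.drop k)
termination_by T.length
decreasing_by simp; omega

-- pvGroupLoop without its accumulator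
def pvEmit (step : Nat) : List Char → Nat → List Char
  | [], _ => []
  | c :: cs, cnt => (if 3 ≤ cnt ∧ (cnt - 3) % step = 0 then [',', c] else [c]) ++ pvEmit step cs (cnt+1)

theorem pvGroupLoop_eq_emit (step : Nat) (cs : List Char) : ∀ (cnt : Nat) (acc : List Char),
    pvGroupLoop step cs cnt acc = acc ++ pvEmit step cs cnt := by
  induction cs with
  | nil => intro cnt acc; simp [pvGroupLoop, pvEmit]
  | cons c cs ih => intro cnt acc; simp [pvGroupLoop, pvEmit, ih]
theorem pvRange_nil (a b k : Int) (hk : k < 0) (h : a ≤ b) : PySem.List.pyRange a b k = [] := by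
  simp [PySem.List.pyRange, hk.ne, not_lt.mpr h]
  omega
theorem pvRange_cons (a b k : Int) (hk : k < 0) (h : b < a) :
    PySem.List.pyRange a b k = a :: PySem.List.pyRange (a+k) b k := by
  simp only [PySem.List.pyRange, if_neg hk.ne, if_neg (by omega : ¬ (0:Int) < k), if_pos h]
  by_cases h2 : b < a + k
  · rw [if_pos h2]
    have e1 : a - b + -k - 1 = (a + k - b + -k - 1) + 1 * (-k) := by ring
    have e2 : ((a - b + -k - 1) / -k) = (a + k - b + -k - 1) / -k + 1 := by
      rw [e1, Int.add_mul_ediv_right _ _ (by omega : (-k) ≠ 0)]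
    have hpos : 0 ≤ (a + k - b + -k - 1) / -k := by
      apply Int.ediv_nonneg <;> omega
    rw [e2]
    have : ((a + k - b + -k - 1) / -k + 1).toNat = ((a + k - b + -k - 1) / -k).toNat + 1 := by omega
    rw [this, List.range_succ_eq_map, List.map_cons, List.map_map]
    refine List.cons_eq_cons.mpr ⟨by simp, ?_⟩
    apply List.map_congr_left; intro x _; simp [Function.comp]; ring
  · rw [if_neg h2]
    have hnum : 0 ≤ a - b + -k - 1 := by omega
    have hlt : a - b + -k - 1 < -k + -k := by omega
    have : (a - b + -k - 1) / -k = 1 := by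
      have e1 : a - b + -k - 1 = (a - b - 1) + 1 * (-k) := by ring
      rw [e1, Int.add_mul_ediv_right _ _ (by omega : (-k) ≠ 0),
        Int.ediv_eq_zero_of_lt (by omega) (by omega)]
      ring
    rw [this]
    simp
theorem pvChunkRev (s : List Char) (k j : Nat) (hk : 1 ≤ k) (hj1 : 1 ≤ j) (hj : j < s.length) :
    (PySem.List.slice s (some (-(j:Int) - (k:Int))) (some (-(j:Int)))).reverse
      = (s.reverse.drop j).take k := by
  have h1 : (-(j:Int) - (k:Int)) = -(((j+k : Nat) : Int)) := by push_cast; ring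
  rw [h1]
  simp only [PySem.List.slice]
  rw [PySem.List.clampIdx_neg_natCast _ _ (by omega), PySem.List.clampIdx_neg_natCast _ _ (by omega)]
  have h2 : s.reverse.drop j = (s.take (s.length - j)).reverse := by
    calc s.reverse.drop j = ((s.reverse.drop j).reverse).reverse := (List.reverse_reverse _).symm
    _ = _ := by rw [List.reverse_drop, List.reverse_reverse, List.length_reverse]
  rw [h2, List.take_reverse, List.drop_take, List.length_take,
    Nat.min_eq_left (by omega : s.length - j ≤ s.length)]
  rw [show s.length - (j+k) = s.length - j - k by omega]
theorem pvMapRange_aux (k : Nat) (hk : 1 ≤ k) (s : List Char) :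
    ∀ (fuel j : Nat), s.length - j ≤ fuel → 3 ≤ j → j < s.length →
    ((PySem.List.pyRange (-(j:Int)) (-(s.length:Int)) (-(k:Int))).map
        (fun x => PySem.List.slice s (some (x-(k:Int))) (some x))).map List.reverse
      = pvChunks k (s.reverse.drop j) := by
  intro fuel
  induction fuel with
  | zero => intro j hf h3 hj; omega
  | succ n ih =>
    intro j hf h3 hj
    rw [pvRange_cons _ _ _ (by omega) (by omega), List.map_cons, List.map_cons]
    have hhead : (PySem.List.slice s (some (-(j:Int) - (k:Int))) (some (-(j:Int)))).reverse
        = (s.reverse.drop j).take k := pvChunkRev s k j (by omega) (by omega) hj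
    have hcast : (-(j:Int) + -(k:Int)) = -(((j+k : Nat)) : Int) := by push_cast; ring_nf
    by_cases hsplit : s.length ≤ j + k
    · rw [hcast, pvRange_nil _ _ _ (by omega) (by omega)]
      simp only [List.map_nil]
      rw [pvChunks, if_pos (Or.inl (by simp; omega))]
      rw [hhead, List.take_of_length_le (by simp; omega)]
    · have hrhs : pvChunks k (s.reverse.drop j)
          = (s.reverse.drop j).take k :: pvChunks k (s.reverse.drop (j+k)) := by
        rw [pvChunks, if_neg (by simp; omega), List.drop_drop]
      rw [hcast, ih (j+k) (by omega) (by omega) (by omega), hhead, hrhs]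

theorem pvMapRange_eq_chunks (k : Nat) (hk : 1 ≤ k) (s : List Char) :
    ∀ j : Nat, 3 ≤ j → j < s.length →
    ((PySem.List.pyRange (-(j:Int)) (-(s.length:Int)) (-(k:Int))).map
        (fun x => PySem.List.slice s (some (x-(k:Int))) (some x))).map List.reverse
      = pvChunks k (s.reverse.drop j) := fun j h3 hj =>
  pvMapRange_aux k hk s s.length j (by omega) h3 hj

theorem pvJoin_append_singleton (sep a : List Char) (L : List (List Char)) (h : L ≠ []) :
    PySem.Chars.join sep (L ++ [a]) = PySem.Chars.join sep L ++ sep ++ a := by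
  induction L with
  | nil => exact absurd rfl h
  | cons x L ih =>
    cases L with
    | nil => simp [PySem.Chars.join_cons_cons, PySem.Chars.join_singleton]
    | cons y L' =>
      rw [List.cons_append, PySem.Chars.join_cons_cons, List.cons_append,
        PySem.Chars.join_cons_cons, ← List.cons_append, ih (by simp)]
      simp [List.append_assoc]
theorem pvJoin_reverse (L : List (List Char)) :
    (PySem.Chars.join [','] L).reverse = PySem.Chars.join [','] (L.reverse.map List.reverse) := by
  induction L with
  | nil => simp [PySem.Chars.join_nil]
  | cons x L ih =>
    cases L with
    | nil => simp [PySem.Chars.join_singleton]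
    | cons y L' =>
      rw [PySem.Chars.join_cons_cons,
        show ((x :: y :: L').reverse) = (y::L').reverse ++ [x] by simp,
        List.map_append, List.map_cons, List.map_nil,
        pvJoin_append_singleton _ _ _ (by simp), ← ih]
      simp [List.reverse_append]
theorem pvLast3_rev (s : List Char) :
    (PySem.List.slice s (some (-3)) none).reverse = s.reverse.take 3 := by
  rw [PySem.List.slice_some_none, show ((-3:Int)) = -((3:Nat):Int) by norm_num,
    PySem.List.clampIdx_neg_natCast _ _ (by omega), List.reverse_drop]
  by_cases h : 3 ≤ s.length
  · congr 1; omega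
  · rw [List.take_of_length_le (by simp; omega), List.take_of_length_le (by simp; omega)]
theorem pvChunks_ne_nil (k : Nat) (T : List Char) : pvChunks k T ≠ [] := by
  unfold pvChunks; split <;> simp
theorem pvEmit_zero (k : Nat) (R : List Char) :
    pvEmit k R 0 = R.take 3 ++ pvEmit k (R.drop 3) 3 := by
  rcases R with _ | ⟨a, _ | ⟨b, _ | ⟨c, T⟩⟩⟩ <;> simp [pvEmit]
theorem pvEmit_within (k : Nat) (hk : 2 ≤ k) :
    ∀ j, 1 ≤ j → j < k → ∀ (T : List Char) (cnt : Nat), 3 ≤ cnt → (cnt - 3) % k = k - j →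
    pvEmit k T cnt = T.take j ++ pvEmit k (T.drop j) (cnt + j) := by
  intro j
  induction j with
  | zero => intro h1; omega
  | succ j ihj =>
    intro _ h2 T cnt h3 hm
    cases T with
    | nil => simp [pvEmit]
    | cons c cs =>
      rw [pvEmit, if_neg (by omega)]
      rcases Nat.eq_zero_or_pos j with hj0 | hj1
      · subst hj0; simp
      · have hm' : (cnt + 1 - 3) % k = k - j := by
          rw [show cnt + 1 - 3 = (cnt - 3) + 1 from by omega, Nat.add_mod, hm,
            Nat.mod_eq_of_lt (show 1 < k by omega),
            show k - (j+1) + 1 = k - j from by omega]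
          exact Nat.mod_eq_of_lt (by omega)
        rw [ihj (by omega) (by omega) cs (cnt+1) (by omega) hm']
        rw [show cnt + 1 + j = cnt + (j+1) from by omega]
        simp

-- at a group boundary the emitter produces the comma-joined chunk list
theorem pvEmit_boundary (k : Nat) (hk : 2 ≤ k) :
    ∀ (T : List Char), T ≠ [] → ∀ cnt, 3 ≤ cnt → (cnt - 3) % k = 0 →
    pvEmit k T cnt = ',' :: PySem.Chars.join [','] (pvChunks k T) := by
  suffices h : ∀ (n : Nat) (T : List Char), T.length ≤ n → T ≠ [] → ∀ cnt, 3 ≤ cnt → (cnt - 3) % k = 0 →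
      pvEmit k T cnt = ',' :: PySem.Chars.join [','] (pvChunks k T) by
    intro T hT cnt h3 hm; exact h T.length T le_rfl hT cnt h3 hm
  intro n
  induction n with
  | zero => intro T hT hne; cases T <;> simp_all
  | succ n ih =>
    intro T hT hne cnt h3 hm
    cases T with
    | nil => exact absurd rfl hne
    | cons c cs =>
      rw [pvEmit, if_pos ⟨h3, hm⟩]
      have hm1 : (cnt + 1 - 3) % k = k - (k-1) := by
        rw [show cnt + 1 - 3 = (cnt - 3) + 1 from by omega, Nat.add_mod, hm,
          show k - (k-1) = 1 from by omega]
        simp [Nat.mod_eq_of_lt (show 1 < k by omega)]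
      rw [pvEmit_within k hk (k-1) (by omega) (by omega) cs (cnt+1) (by omega) hm1]
      by_cases hlen : (c :: cs).length ≤ k
      · rw [pvChunks, if_pos (Or.inl hlen), PySem.Chars.join_singleton]
        simp at hlen
        rw [List.take_of_length_le (by omega), List.drop_eq_nil_of_le (by omega)]
        simp [pvEmit]
      · rw [pvChunks, if_neg (by omega)]
        have hdrop : (c :: cs).drop k = cs.drop (k-1) := by
          cases k with | zero => omega | succ m => simp
        have htake : (c :: cs).take k = c :: cs.take (k-1) := by
          cases k with | zero => omega | succ m => simp
        obtain ⟨c2, L2, hCH⟩ := List.exists_cons_of_ne_nil (pvChunks_ne_nil k ((c :: cs).drop k))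
        rw [hCH, PySem.Chars.join_cons_cons, ← hCH]
        rw [ih (cs.drop (k-1)) (by simp at hT ⊢; omega) (by simp at hlen ⊢; omega)
          (cnt + 1 + (k-1)) (by omega)
          (by rw [show cnt + 1 + (k-1) - 3 = (cnt - 3) + k from by omega, Nat.add_mod_right]; exact hm)]
        rw [htake, hdrop]
        simp

-- the central equality: A's slice/range grouping = B's accumulator pass
theorem pvGroup_eq (k : Nat) (hk : 2 ≤ k) (s : List Char) :
    PySem.Chars.join [','] ((((PySem.List.pyRange (-3) (-(s.length:Int)) (-(k:Int))).map
        (fun x => PySem.List.slice s (some (x-(k:Int))) (some x))).reverse)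
      ++ [PySem.List.slice s (some (-3)) none])
    = (pvGroupLoop k s.reverse 0 []).reverse := by
  rw [pvGroupLoop_eq_emit, List.nil_append]
  have key : (PySem.Chars.join [','] ((((PySem.List.pyRange (-3) (-(s.length:Int)) (-(k:Int))).map
      (fun x => PySem.List.slice s (some (x-(k:Int))) (some x))).reverse)
      ++ [PySem.List.slice s (some (-3)) none])).reverse = pvEmit k s.reverse 0 := by
    rw [pvJoin_reverse, List.reverse_append, List.reverse_reverse]
    simp only [List.reverse_cons, List.reverse_nil, List.nil_append,
      List.map_cons, List.singleton_append]
    rw [pvLast3_rev]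
    by_cases hlen : s.length ≤ 3
    · rw [show ((-3 : Int)) = -((3:Nat):Int) from by norm_num] at *
      rw [pvRange_nil _ _ _ (by omega) (by omega)]
      simp only [List.map_nil, PySem.Chars.join_singleton]
      rw [pvEmit_zero, List.drop_eq_nil_of_le (by simp; omega)]
      simp [pvEmit, List.take_of_length_le (show s.reverse.length ≤ 3 by simp; omega)]
    · rw [show ((-3 : Int)) = -((3:Nat):Int) from by norm_num,
        pvMapRange_eq_chunks k (by omega) s 3 (by omega) (by omega)]
      obtain ⟨c2, L2, hCH⟩ := List.exists_cons_of_ne_nil (pvChunks_ne_nil k (s.reverse.drop 3))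
      rw [hCH, PySem.Chars.join_cons_cons, ← hCH]
      rw [pvEmit_zero, pvEmit_boundary k hk (s.reverse.drop 3) (by simp; omega) 3 (by omega) (by simp)]
      simp
  rw [← key, List.reverse_reverse]

theorem pvFirstDigit_index (w : List Char) (h : w.any PySem.Chars.isdigit = true) :
    PySem.List.index? (w.map PySem.Chars.isdigit) true = some (pvFirstDigit w) := by
  induction w with
  | nil => simp at h
  | cons c cs ih =>
    by_cases hc : PySem.Chars.isdigit c
    · rw [List.map_cons, hc, PySem.List.index?_cons_self]
      simp [pvFirstDigit, hc]
    · rw [List.map_cons, eq_false_of_ne_true hc,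
        PySem.List.index?_cons_of_ne _ (by simp), ih (by simpa [hc] using h)]
      simp [pvFirstDigit, hc]
theorem pvFirstDigit_lt (w : List Char) (h : w.any PySem.Chars.isdigit = true) :
    pvFirstDigit w < w.length := by
  induction w with
  | nil => simp at h
  | cons c cs ih =>
    by_cases hc : PySem.Chars.isdigit c
    · simp [pvFirstDigit, hc]
    · have := ih (by simpa [hc] using h)
      simp [pvFirstDigit, hc]; omega
theorem pvJoin_nil3 (a b c : List Char) : PySem.Chars.join [] [a, b, c] = a ++ b ++ c := by
  rw [PySem.Chars.join_cons_cons, PySem.Chars.join_cons_cons, PySem.Chars.join_singleton]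
  simp
-- the two grouping expressions of A, rewritten through pvGroup_eq with k = 2 and k = 3
theorem pvGroup_eq2 (s : List Char) :
    PySem.Chars.join [','] ((((PySem.List.pyRange (-3) (-(s.length:Int)) (-2)).map
        (fun x => PySem.List.slice s (some (x-2)) (some x))).reverse)
      ++ [PySem.List.slice s (some (-3)) none])
    = (pvGroupLoop 2 s.reverse 0 []).reverse := by
  have h := pvGroup_eq 2 (by omega) s
  norm_num at h
  exact h

theorem pvGroup_eq3 (s : List Char) :
    PySem.Chars.join [','] ((((PySem.List.pyRange (-3) (-(s.length:Int)) (-3)).map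
        (fun x => PySem.List.slice s (some (x-3)) (some x))).reverse)
      ++ [PySem.List.slice s (some (-3)) none])
    = (pvGroupLoop 3 s.reverse 0 []).reverse := by
  have h := pvGroup_eq 3 (by omega) s
  norm_num at h
  exact h

-- the shared tail of both word functions after the currency sign is split off
theorem pvWordSuffix_eq (w1 : List Char) (lang : String) :
    PySem.Chars.join []
      ([if lang = "hi" then
          PySem.Chars.join [','] ((((PySem.List.pyRange (-3) (-((if PySem.Chars.find w1 ['.'] = -1 then w1 else PySem.List.slice w1 none (some (PySem.Chars.find w1 ['.']))).length:Int)) (-2)).map (fun x => PySem.List.slice (if PySem.Chars.find w1 ['.'] = -1 then w1 else PySem.List.slice w1 none (some (PySem.Chars.find w1 ['.']))) (some (x-2)) (some x))).reverse) ++ [PySem.List.slice (if PySem.Chars.find w1 ['.'] = -1 then w1 else PySem.List.slice w1 none (some (PySem.Chars.find w1 ['.']))) (some (-3)) none])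
        else
          PySem.Chars.join [','] ((((PySem.List.pyRange (-3) (-((if PySem.Chars.find w1 ['.'] = -1 then w1 else PySem.List.slice w1 none (some (PySem.Chars.find w1 ['.']))).length:Int)) (-3)).map (fun x => PySem.List.slice (if PySem.Chars.find w1 ['.'] = -1 then w1 else PySem.List.slice w1 none (some (PySem.Chars.find w1 ['.']))) (some (x-3)) (some x))).reverse) ++ [PySem.List.slice (if PySem.Chars.find w1 ['.'] = -1 then w1 else PySem.List.slice w1 none (some (PySem.Chars.find w1 ['.']))) (some (-3)) none])]
       ++ (if PySem.Chars.find w1 ['.'] = -1 then [[],[]] else [['.'], PySem.List.slice w1 (some (PySem.Chars.find w1 ['.'] + 1)) none]))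
    = (pvGroupLoop (if lang = "hi" then 2 else 3) (if PySem.Chars.find w1 ['.'] = -1 then w1 else PySem.List.slice w1 none (some (PySem.Chars.find w1 ['.']))).reverse 0 []).reverse
      ++ (if PySem.Chars.find w1 ['.'] = -1 then ([] : List Char) else ['.'])
      ++ (if PySem.Chars.find w1 ['.'] = -1 then ([] : List Char) else PySem.List.slice w1 (some (PySem.Chars.find w1 ['.'] + 1)) none) := by
  by_cases hi : PySem.Chars.find w1 ['.'] = -1 <;>
    by_cases hl : lang = "hi" <;>
      simp only [hi, hl, if_true, if_false,
        List.cons_append, List.nil_append] <;>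
      rw [show ∀ (a b c : List Char), PySem.Chars.join [] [a, b, c] = a ++ b ++ c from pvJoin_nil3] <;>
      first
        | rw [pvGroup_eq2]
        | rw [pvGroup_eq3]

theorem pvWord_eq (w : List Char) (lang : String) :
    pvWordA w lang = pvWordB w (if lang = "hi" then 2 else 3) := by
  unfold pvWordA pvWordB
  by_cases hd : w.any PySem.Chars.isdigit
  case neg =>
    simp only [List.any_map, Function.comp_def, id_eq]
    rw [if_neg (show ¬(w.any (fun c => PySem.Chars.isdigit c) = true) by simpa using hd),
      if_pos (show ¬(w.any PySem.Chars.isdigit = true) from hd)]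
  case pos =>
    simp only [List.any_map, Function.comp_def, id_eq]
    rw [if_pos (show w.any (fun c => PySem.Chars.isdigit c) = true by simpa using hd),
      if_neg (show ¬¬(w.any PySem.Chars.isdigit = true) from not_not_intro hd)]
    by_cases hg : 4 < w.length ∧ PySem.Chars.isIn [':'] w = false
    case neg =>
      rw [if_neg hg, if_pos (by
        rcases not_and_or.mp hg with h1 | h2
        · exact Or.inl (by omega)
        · exact Or.inr (by simpa using h2))]
    case pos =>
      rw [if_pos hg, if_neg (not_or.mpr ⟨by omega, by simp [hg.2]⟩)]
      rw [pvFirstDigit_index w hd]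
      simp only []
      have hlt := pvFirstDigit_lt w hd
      have hsign : PySem.List.slice w none (some ((pvFirstDigit w : Nat) : Int)) = w.take (pvFirstDigit w) :=
        PySem.List.slice_to_natCast w (pvFirstDigit w)
      have hrest : PySem.List.slice w (some ((pvFirstDigit w : Nat) : Int)) none = w.drop (pvFirstDigit w) :=
        PySem.List.slice_from_natCast w (pvFirstDigit w)
      by_cases hp : pvFirstDigit w ≠ 0
      case pos =>
        rw [if_pos hp, if_pos hp, if_pos (by
          rw [hsign]
          simp only [ne_eq, List.take_eq_nil_iff, not_or]
          constructor
          · exact hp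
          · intro hnil; rw [hnil] at hlt; simp at hlt)]
        rw [hsign, hrest]
        rw [pvWordSuffix_eq (w.drop (pvFirstDigit w)) lang]
        simp [List.append_assoc]
      case neg =>
        rw [if_neg hp, if_neg hp, if_neg (by simp)]
        have hp0 : pvFirstDigit w = 0 := not_ne_iff.mp hp
        rw [hsign, hrest, hp0, List.take_zero, List.drop_zero]
        rw [pvWordSuffix_eq w lang]
        simp [List.append_assoc]

-- ===== VERDICT (by name: the statement is the Claim_ definition above) =====
theorem format_numbers_with_commas_spec : Claim_equal_format_numbers_with_commas := by
  intro sent lang _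
  unfold Spec_format_numbers_with_commas format_numbers_with_commas format_numbers_with_commas_alt
  exact congrArg String.ofList (congrArg (PySem.Chars.join [' '])
    (List.map_congr_left (fun w _ => pvWord_eq w lang)))
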